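-- pv_equiv track=rewrite | github.com/Big-Theta/EulerProblems | bintools/backup/bintools.py | isfixed
-- ===== SOURCE A (Python) =====
-- def isfixed(binval):
--     if not type (binval) is str:
--         return False
--     for i in binval:
--         fixedset = set("01.")
--         for i in binval:
--             if not i in fixedset: return False
--     return True
-- ===== SOURCE B (Python) =====
-- def isfixed(binval):
--     if not type(binval) is str:
--         return False
--     return binval.strip("01.") == ""
-- ===== Notes on version B (the rewrite author's own statement) =====
-- stated objective: simpler
-- what changed: Instead of A's nested loops testing each character against a set, B strips all allowed characters from both ends of the string and returns whether the residue is empty (a string is all-allowed iff trimming allowed characters from both ends leaves nothing).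
import Mathlib
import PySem

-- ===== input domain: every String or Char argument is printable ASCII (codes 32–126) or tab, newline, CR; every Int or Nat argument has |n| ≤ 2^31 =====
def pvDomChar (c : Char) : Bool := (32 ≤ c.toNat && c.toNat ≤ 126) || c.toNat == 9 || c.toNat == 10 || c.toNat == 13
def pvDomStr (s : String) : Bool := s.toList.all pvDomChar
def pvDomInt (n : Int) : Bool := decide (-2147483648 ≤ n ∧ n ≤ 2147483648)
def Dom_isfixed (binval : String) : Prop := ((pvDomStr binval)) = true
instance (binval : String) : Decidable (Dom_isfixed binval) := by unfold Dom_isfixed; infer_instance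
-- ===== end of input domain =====

-- B replaces A's nested membership loops by stripping the allowed characters '01.' from
-- both ends and testing whether the residue is empty (simpler, no explicit loop).

-- ===== PORT A =====
-- inner loop: 'for i in binval: if not i in fixedset: return False' (none = fell through, no return)
def pvInnerA (fixedset : PySem.Set Char) : List Char → Option Bool
  | [] => none
  | c :: rest => if !(PySem.Set.contains fixedset c) then some false else pvInnerA fixedset rest

-- outer loop: 'for i in binval: fixedset = set("01."); <inner loop>'
def pvOuterA (outer : List Char) (s : List Char) : Bool :=
  match outer with
  | [] => true
  | _ :: rest =>
      let fixedset := PySem.Set.ofList "01.".toList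
      match pvInnerA fixedset s with
      | some b => b
      | none => pvOuterA rest s

-- 'if not type(binval) is str: return False' is vacuous here: binval is a String by type
def isfixed (binval : String) : Bool := pvOuterA binval.toList binval.toList

-- ===== PORT B =====
-- 'return binval.strip("01.") == ""'
def isfixed_alt (binval : String) : Bool := PySem.Str.stripChars binval "01." == ""

-- ===== PRECONDITION & SPEC =====
def Spec_isfixed (binval : String) (out : Bool) : Prop := out = isfixed_alt binval
instance (binval : String) (out : Bool) : Decidable (Spec_isfixed binval out) := by unfold Spec_isfixed; infer_instance

-- ===== CLAIM =====
def Claim_equal_isfixed : Prop := ∀ (binval : String), Dom_isfixed binval → Spec_isfixed binval (isfixed binval)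

-- ===== LEMMAS AND PROOFS =====

theorem pvInnerA_eq (fs : PySem.Set Char) (l : List Char) :
    pvInnerA fs l = if ∀ x ∈ l, x ∈ fs then none else some false := by
  induction l with
  | nil => simp [pvInnerA]
  | cons c rest ih =>
    by_cases h : c ∈ fs
    · simp [pvInnerA, ih, h]
    · simp [pvInnerA, h]

theorem pvOuterA_eq (outer s : List Char) :
    pvOuterA outer s =
      (outer.isEmpty || decide (∀ x ∈ s, x ∈ PySem.Set.ofList "01.".toList)) := by
  induction outer with
  | nil => simp [pvOuterA]
  | cons c rest ih =>
    simp only [pvOuterA, pvInnerA_eq]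
    by_cases hs : ∀ x ∈ s, x ∈ PySem.Set.ofList "01.".toList
    · rw [if_pos hs]; simp [ih]
      intro _ x hx
      simpa using hs x hx
    · rw [if_neg hs]; simp
      push_neg at hs
      obtain ⟨x, hx, hnx⟩ := hs
      exact ⟨x, hx, by simpa using hnx⟩

-- stripChars leaves the empty string exactly when every character is one of the stripped ones
theorem stripChars_nil_iff (s chars : List Char) :
    PySem.Chars.stripChars s chars = [] ↔ ∀ x ∈ s, chars.contains x := by
  unfold PySem.Chars.stripChars
  constructor
  · intro h x hx
    have h1 : ∀ y ∈ (List.dropWhile (fun c => chars.contains c) s).reverse,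
        chars.contains y := by
      simpa [List.dropWhile_eq_nil_iff] using h
    have h2 : ∀ y ∈ List.dropWhile (fun c => chars.contains c) s, chars.contains y := by
      intro y hy; exact h1 y (by simpa using hy)
    have hsplit := List.takeWhile_append_dropWhile (p := fun c => chars.contains c) (l := s)
    rw [← hsplit] at hx
    rcases List.mem_append.mp hx with h | h
    · exact List.mem_takeWhile_imp h
    · exact h2 x h
  · intro h
    show (List.dropWhile (fun c => chars.contains c)
        (List.dropWhile (fun c => chars.contains c) s).reverse).reverse = []
    rw [List.dropWhile_eq_nil_iff.mpr (fun x hx => h x hx)]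
    simp

-- ===== VERDICT =====
theorem isfixed_spec : Claim_equal_isfixed := by
  intro binval _
  unfold Spec_isfixed isfixed isfixed_alt
  rw [pvOuterA_eq]
  have hB : (PySem.Str.stripChars binval "01." == "") =
      decide (∀ x ∈ binval.toList, x ∈ PySem.Set.ofList "01.".toList) := by
    rw [Bool.eq_iff_iff]
    simp only [beq_iff_eq, decide_eq_true_eq]
    rw [show (PySem.Str.stripChars binval "01." = "") ↔
        (PySem.Str.stripChars binval "01.").toList = [] from
      ⟨fun h => by simp [h], fun h => by
        have h2 := congrArg String.ofList h
        rwa [String.ofList_toList] at h2⟩]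
    rw [PySem.Str.toList_stripChars, stripChars_nil_iff]
    constructor
    · intro h x hx
      simpa [PySem.Set.mem_ofList] using (by simpa using h x hx : x ∈ "01.".toList)
    · intro h x hx
      have := h x hx
      simp [PySem.Set.mem_ofList] at this
      simpa using this
  rw [hB]
  cases binval.toList with
  | nil => simp
  | cons c rest => simp
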